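-- pv_equiv track=rewrite | github.com/jaynikam2005/MAGE-----Multi-Agent-Game-Tester | src/agents/multi_agent/orchestrator.py | _distribute_tests
-- ===== SOURCE A (Python) =====
-- from typing import Dict, List, Any, Optional, Tuple
--
-- def _distribute_tests(tests: List[Dict[str, Any]], agent_count: int) -> List[List[Dict[str, Any]]]:
--     """Distribute tests evenly across available agents"""
--     if agent_count == 0:
--         return []
--
--     batches = [[] for _ in range(agent_count)]
--     for i, test in enumerate(tests):
--         batch_index = i % agent_count
--         batches[batch_index].append(test)
--
--     return batches
-- ===== SOURCE B (Python) =====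
-- from typing import Dict, List, Any
--
--
-- def _distribute_tests(tests: List[Dict[str, Any]], agent_count: int) -> List[List[Dict[str, Any]]]:
--     """Distribute tests evenly across available agents (round-robin)."""
--     return [tests[i::agent_count] for i in range(agent_count)]
-- ===== Notes on version B (the rewrite author's own statement) =====
-- stated objective: idiomatic
-- what changed: Replaces the enumerate-and-modulo dispatch loop over tests with one strided slice tests[i::agent_count] per agent, inverting the traversal from per-test row-major dispatch to per-agent column-major slicing.
import Mathlib
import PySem

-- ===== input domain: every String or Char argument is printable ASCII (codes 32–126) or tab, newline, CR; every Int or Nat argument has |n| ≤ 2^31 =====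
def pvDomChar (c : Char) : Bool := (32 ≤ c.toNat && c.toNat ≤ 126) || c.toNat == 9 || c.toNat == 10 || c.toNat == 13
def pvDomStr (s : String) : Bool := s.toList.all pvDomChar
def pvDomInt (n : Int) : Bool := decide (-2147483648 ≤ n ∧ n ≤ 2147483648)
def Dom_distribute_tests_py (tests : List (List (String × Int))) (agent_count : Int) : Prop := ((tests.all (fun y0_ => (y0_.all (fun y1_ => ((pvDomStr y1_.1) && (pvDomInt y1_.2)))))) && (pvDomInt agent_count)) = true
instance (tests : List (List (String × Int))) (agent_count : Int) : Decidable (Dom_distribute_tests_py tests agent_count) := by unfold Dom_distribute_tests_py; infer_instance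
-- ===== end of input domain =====

-- B replaces A's enumerate-and-modulo dispatch loop with one strided slice per agent
-- (idiomatic column-major slicing instead of row-major round-robin dispatch).

-- ===== PORT A =====
def distribute_tests_py (tests : List (List (String × Int))) (agent_count : Int) : List (List (List (String × Int))) :=
  if agent_count = 0 then []
  else
    (PySem.List.enumerate tests 0).foldl
      (fun batches p =>
        batches.modify (PySem.Int.mod p.1 agent_count).toNat (fun b => b ++ [p.2]))
      (List.replicate agent_count.toNat [])

-- ===== PORT B =====
def distribute_tests_py_alt (tests : List (List (String × Int))) (agent_count : Int) : List (List (List (String × Int))) :=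
  (PySem.List.pyRange 0 agent_count 1).map
    (fun i => (PySem.List.slice? tests (some i) none agent_count).getD [])

-- ===== PRECONDITION & SPEC =====
-- Pre_ excludes only agent_count < 0 with non-empty tests, where Python A raises IndexError
-- (batches is empty but the loop indexes into it).
def Pre_distribute_tests_py (tests : List (List (String × Int))) (agent_count : Int) : Prop :=
  0 ≤ agent_count ∨ tests = []

instance (tests : List (List (String × Int))) (agent_count : Int) : Decidable (Pre_distribute_tests_py tests agent_count) := by unfold Pre_distribute_tests_py; infer_instance

def pvWitness_distribute_tests_py : (List (List (String × Int))) × Int :=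
  ([[("a", 1)], [("b", 2)], [("c", 3)]], 2)

def Spec_distribute_tests_py (tests : List (List (String × Int))) (agent_count : Int) (out : List (List (List (String × Int)))) : Prop := out = distribute_tests_py_alt tests agent_count
instance (tests : List (List (String × Int))) (agent_count : Int) (out : List (List (List (String × Int)))) : Decidable (Spec_distribute_tests_py tests agent_count out) := by unfold Spec_distribute_tests_py; infer_instance

-- ===== CLAIM (what is proved, stated in full; the proofs are below) =====
def Claim_equal_distribute_tests_py : Prop := ∀ (tests : List (List (String × Int))) (agent_count : Int), Dom_distribute_tests_py tests agent_count → Pre_distribute_tests_py tests agent_count → Spec_distribute_tests_py tests agent_count (distribute_tests_py tests agent_count)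


-- ===== LEMMAS AND PROOFS =====

-- elements of a list at positions 0, n, 2n, … (what B's slice tests[i::n] keeps of tests.drop i)
def pvStrided {α : Type} : List α → Nat → List α
  | [], _ => []
  | x :: xs, n => x :: pvStrided (xs.drop (n - 1)) n
termination_by l _ => l.length
decreasing_by simp

-- first index k ≥ 0 with (s + k) % n = j, given a = s % n and j < n
def pvOff (j a n : Nat) : Nat := if a ≤ j then j - a else j + n - a

theorem pvStrided_eq_filterMap {α : Type} (ys : List α) (n : Nat) (hn : 0 < n) :
    (List.range ((ys.length + (n - 1)) / n)).filterMap (fun k => ys[n * k]?) = pvStrided ys n := by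
  induction hL : ys.length using Nat.strong_induction_on generalizing ys with
  | _ L ih =>
  match ys with
  | [] => simp [pvStrided]
  | x :: xs =>
    subst hL
    have hcount : (((x :: xs).length + (n - 1)) / n) = ((xs.drop (n-1)).length + (n - 1)) / n + 1 := by
      simp only [List.length_cons, List.length_drop]
      rcases Nat.lt_or_ge xs.length n with h | h
      · rw [show (xs.length + 1 + (n-1)) / n = 1 from Nat.div_eq_of_lt_le (by omega) (by omega),
          show (xs.length - (n-1) + (n-1)) / n = 0 from Nat.div_eq_of_lt (by omega)]
      · have h1 : xs.length - (n - 1) + (n - 1) = xs.length := by omega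
        have h2 : xs.length + 1 + (n - 1) = xs.length + n := by omega
        rw [h1, h2, Nat.add_div_right _ hn]
    rw [hcount, List.range_succ_eq_map, List.filterMap_cons]
    have h0 : (x :: xs)[n * 0]? = some x := by simp
    rw [h0, List.filterMap_map]
    have hstep : (fun k => (x :: xs)[n * k]?) ∘ Nat.succ = fun k => (xs.drop (n-1))[n * k]? := by
      funext k
      simp only [Function.comp_apply]
      rw [List.getElem?_drop]
      have : n * Nat.succ k = ((n - 1) + n * k) + 1 := by rw [Nat.mul_succ]; omega
      rw [this, List.getElem?_cons_succ]
    rw [hstep, ih (xs.drop (n-1)).length (by simp) _ rfl, pvStrided]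

theorem pv_slice?_eq {α : Type} (xs : List α) (i n : Nat) (hn : 0 < n) :
    PySem.List.slice? xs (some (i : Int)) none (n : Int) = some (pvStrided (xs.drop i) n) := by
  have hn' : ¬ ((n : Int) = 0) := by exact_mod_cast Nat.pos_iff_ne_zero.mp hn
  have hnneg : ¬ ((n : Int) < 0) := by omega
  have hineg : ¬ ((i : Int) < 0) := by omega
  simp only [PySem.List.slice?, PySem.List.sliceIndices, hn', hnneg, hineg, if_false]
  rcases Nat.lt_or_ge i xs.length with h | h
  · have hmin : min (i : Int) (xs.length : Int) = (i : Int) := by omega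
    have hlt : ((i:Int) < (xs.length : Int)) := by exact_mod_cast h
    rw [hmin]
    simp only [if_pos (by exact_mod_cast hn : (0:Int) < (n:Int)), if_pos hlt]
    have hcnt : (((xs.length : Int) - i + n - 1) / n).toNat = ((xs.drop i).length + (n - 1)) / n := by
      have : ((xs.length : Int) - i + n - 1) = (((xs.length - i) + (n - 1) : Nat) : Int) := by
        push_cast; omega
      rw [this, ← Int.natCast_div, Int.toNat_natCast, List.length_drop]
    rw [hcnt]
    have harg : (fun k : Nat => xs[((i:Int) + (n:Int) * (k:Int)).toNat]?) = fun k : Nat => (xs.drop i)[n * k]? := by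
      funext k
      have : ((i:Int) + (n:Int) * (k:Int)).toNat = i + n * k := by omega
      rw [this, List.getElem?_drop]
    rw [harg, pvStrided_eq_filterMap _ _ hn]
  · have hmin : min (i : Int) (xs.length : Int) = (xs.length : Int) := by omega
    have hnlt : ¬ ((xs.length : Int) < (xs.length : Int)) := by omega
    rw [hmin]
    simp only [if_pos (by exact_mod_cast hn : (0:Int) < (n:Int)), if_neg hnlt]
    rw [List.drop_of_length_le h]
    simp [pvStrided]

-- a length-n list is the range-n map of its getD entries
theorem pv_map_getD_range {α : Type} (B : List α) (d : α) :
    (List.range B.length).map (fun j => B.getD j d) = B := by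
  apply List.ext_getElem (by simp)
  intro k h1 h2
  simp [List.getD_eq_getElem?_getD, List.getElem?_eq_getElem h2]

-- the round-robin fold invariant: starting from batches B and counter s, batch j receives
-- exactly the elements of ts at offsets ≡ (j - s) (mod n)
theorem pv_fold_invariant {α : Type} (n : Nat) (hn : 0 < n) (ts : List α) (s : Nat)
    (B : List (List α)) (hB : B.length = n) :
    (PySem.List.enumerate ts (s : Int)).foldl
        (fun b p => b.modify (PySem.Int.mod p.1 (n : Int)).toNat (fun l => l ++ [p.2])) B
      = (List.range n).map (fun j => B.getD j [] ++ pvStrided (ts.drop (pvOff j (s % n) n)) n) := by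
  induction ts generalizing s B with
  | nil =>
    simp only [PySem.List.enumerate, List.foldl_nil]
    have : ∀ j ∈ List.range n, B.getD j [] ++ pvStrided (List.drop (pvOff j (s % n) n) []) n = B.getD j [] := by
      intro j _; simp [pvStrided]
    rw [List.map_congr_left this, ← hB, pv_map_getD_range]
  | cons x ts ih =>
    rw [PySem.List.enumerate_cons, List.foldl_cons]
    have hmod : (PySem.Int.mod ((s : Int)) (n : Int)).toNat = s % n := by
      rw [PySem.Int.mod_natCast, Int.toNat_natCast]
    have hs1 : ((s : Int) + 1) = ((s + 1 : Nat) : Int) := by push_cast; ring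
    rw [hmod, hs1, ih (s + 1) _ (by rw [List.length_modify]; exact hB)]
    apply List.map_congr_left
    intro j hj
    have hjn : j < n := List.mem_range.mp hj
    have ha : s % n < n := Nat.mod_lt _ hn
    have ha' : (s + 1) % n = if s % n + 1 = n then 0 else s % n + 1 := by
      rw [Nat.add_mod]
      rcases Nat.lt_or_ge 1 n with h1 | h1
      · rw [Nat.mod_eq_of_lt h1]
        split
        · next h => rw [h, Nat.mod_self]
        · next h => exact Nat.mod_eq_of_lt (by omega)
      · have hn1 : n = 1 := by omega
        subst hn1; simp [Nat.mod_one]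
    have hgetD : (B.modify (s % n) (fun l => l ++ [x])).getD j []
        = if s % n = j then B.getD j [] ++ [x] else B.getD j [] := by
      simp only [List.getD_eq_getElem?_getD, List.getElem?_modify]
      rcases Nat.lt_or_ge j B.length with h | h
      · rw [List.getElem?_eq_getElem h]
        split <;> simp
      · exfalso; omega
    rw [hgetD]
    by_cases hja : s % n = j
    · rw [if_pos hja]
      have h1 : pvOff j (s % n) n = 0 := by unfold pvOff; split_ifs <;> omega
      have h2 : pvOff j ((s + 1) % n) n = n - 1 := by
        rw [ha']; unfold pvOff; split_ifs <;> omega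
      rw [h1, h2, List.drop_zero, pvStrided, List.append_assoc, List.singleton_append]
    · rw [if_neg hja]
      have h1 : pvOff j (s % n) n = pvOff j ((s + 1) % n) n + 1 := by
        rw [ha']; unfold pvOff; split_ifs <;> omega
      rw [h1, List.drop_succ_cons]

-- ===== VERDICT (by name: the statement is the Claim_ definition above) =====
theorem distribute_tests_py_spec : Claim_equal_distribute_tests_py := by
  intro tests ac _ hpre
  unfold Spec_distribute_tests_py distribute_tests_py distribute_tests_py_alt
  rcases lt_trichotomy ac 0 with hneg | hzero | hpos
  · -- ac < 0: Pre_ forces tests = []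
    rcases hpre with h | h
    · omega
    · subst h
      have hr : PySem.List.pyRange 0 ac 1 = [] := by apply PySem.List.pyRange_one_eq_nil; omega
      rw [if_neg (by omega), hr]
      simp [PySem.List.enumerate]
      omega
  · subst hzero
    have hr : PySem.List.pyRange 0 0 1 = [] := by apply PySem.List.pyRange_one_eq_nil; omega
    rw [if_pos rfl, hr]
    simp
  · -- ac > 0
    obtain ⟨n, rfl⟩ : ∃ n : Nat, ac = (n : Int) := ⟨ac.toNat, by omega⟩
    have hn : 0 < n := by exact_mod_cast hpos
    rw [if_neg (by exact_mod_cast Nat.pos_iff_ne_zero.mp hn)]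
    rw [PySem.List.pyRange_zero_nat n, List.map_map,
      show ((0 : Int)) = ((0 : Nat) : Int) from rfl,
      pv_fold_invariant n hn tests 0 (List.replicate (((n : Int)).toNat) []) (by simp)]
    apply List.map_congr_left
    intro j hj
    have hjn : j < n := List.mem_range.mp hj
    rw [Function.comp_apply, pv_slice?_eq tests j n hn, Option.getD_some]
    have h0 : pvOff j (0 % n) n = j := by
      unfold pvOff; rw [Nat.zero_mod]; split_ifs <;> omega
    rw [h0]
    simp [List.getD_eq_getElem?_getD, hjn]
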